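-- pv_equiv track=rewrite | github.com/PennyDreadfulMTG/Penny-Dreadful-Tools | decksite/deck_name.py | replace_space_alternatives
-- ===== SOURCE A (Python) =====
-- def replace_space_alternatives(name: str) -> str:
--     name = name.replace('_', ' ')
--     # Preserve periods in semver versions but otherwise replace them
--     new_name = []
--     for i, char in enumerate(name):
--         if char == '.':
--             prev_char_is_digit = i > 0 and name[i - 1].isdigit()
--             next_char_is_digit = i < len(name) - 1 and name[i + 1].isdigit()
--             new_name.append(' ' if not (prev_char_is_digit and next_char_is_digit) else char)
--         else:
--             new_name.append(char)
--     return ''.join(new_name)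
-- ===== SOURCE B (Python) =====
-- def replace_space_alternatives(name: str) -> str:
--     name = name.replace('_', ' ')
--     # Split on periods, then re-join the segments, choosing each joiner:
--     # keep '.' only between a digit end and a digit start (semver), else ' '.
--     parts = name.split('.')
--     out = parts[0]
--     for part in parts[1:]:
--         sep = '.' if (out[-1:].isdigit() and part[:1].isdigit()) else ' '
--         out += sep + part
--     return out
-- ===== Notes on version B (the rewrite author's own statement) =====
-- stated objective: faster
-- what changed: Replaces A's per-character index loop with its i/prev_char_is_digit/next_char_is_digit bookkeeping by a split-then-join algorithm: split the name on the period character, then re-join the segments, keeping the period joiner only between a segment ending in a digit and one starting with a digit, otherwise a space.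
import Mathlib
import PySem

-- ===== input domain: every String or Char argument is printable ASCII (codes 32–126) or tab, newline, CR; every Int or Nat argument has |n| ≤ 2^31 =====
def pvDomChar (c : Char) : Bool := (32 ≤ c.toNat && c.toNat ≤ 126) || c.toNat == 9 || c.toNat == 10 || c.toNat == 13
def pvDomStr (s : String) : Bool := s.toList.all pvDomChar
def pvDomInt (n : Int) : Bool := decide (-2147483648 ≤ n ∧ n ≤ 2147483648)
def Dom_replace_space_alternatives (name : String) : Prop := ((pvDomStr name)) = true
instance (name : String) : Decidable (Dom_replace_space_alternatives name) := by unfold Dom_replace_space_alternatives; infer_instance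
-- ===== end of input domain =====

-- B replaces A's single character loop (index i with prev/next digit bookkeeping)
-- by a split-then-join algorithm: split on '.', then re-join the segments choosing
-- each joiner ('.' between digit end / digit start, otherwise ' ')
-- (objective: faster — the character loop moves into C-level str.split/concat; measured faster in a timing run).

-- ===== PORT A =====
-- Literal port of A: replace '_', then loop over enumerate(name) testing whether
-- the neighbours of each '.' are digits; name[i-1]/name[i+1] are guarded in-range
-- by the `i > 0` / `i < len-1` conjuncts, so pyGetD with a dummy default is exact.
def replace_space_alternatives (name : String) : String :=
  let name := PySem.Str.replace name "_" " "
  let s := name.toList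
  let new_name := (PySem.List.enumerate s).map (fun (ic : Int × Char) =>
    let i := ic.1
    let char := ic.2
    if char = '.' then
      let prev_char_is_digit := decide (i > 0) && PySem.Chars.isdigit (PySem.List.pyGetD s (i - 1) ' ')
      let next_char_is_digit := decide (i < (s.length : Int) - 1) && PySem.Chars.isdigit (PySem.List.pyGetD s (i + 1) ' ')
      if !(prev_char_is_digit && next_char_is_digit) then ' ' else char
    else char)
  String.ofList new_name

-- ===== PORT B =====
-- out[-1:].isdigit() of Source B: the one-char slice is empty iff the string is empty,
-- and ''.isdigit() is False, so it is exactly "last char exists and is a digit".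
def raLastDigit (cs : List Char) : Bool :=
  match cs.getLast? with
  | some c => PySem.Chars.isdigit c
  | none => false

-- part[:1].isdigit() of Source B, likewise on the first char.
def raHeadDigit (cs : List Char) : Bool :=
  match cs.head? with
  | some c => PySem.Chars.isdigit c
  | none => false

-- the for-loop of Source B: out += sep + part for each remaining part
def raFold : List Char → List (List Char) → List Char
  | out, [] => out
  | out, part :: rest =>
      let sep := if raLastDigit out && raHeadDigit part then '.' else ' '
      raFold (out ++ sep :: part) rest

-- Port of B: name.split('.') is ported as the corresponding Lean function
-- List.splitOn '.' (exact for a one-char separator); parts is never empty in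
-- Python, so the [] arm is unreachable.
def replace_space_alternatives_alt (name : String) : String :=
  let name := PySem.Str.replace name "_" " "
  match List.splitOn '.' name.toList with
  | [] => ""
  | p :: rest => String.ofList (raFold p rest)

-- ===== PRECONDITION & SPEC =====
def Spec_replace_space_alternatives (name : String) (out : String) : Prop := out = replace_space_alternatives_alt name
instance (name : String) (out : String) : Decidable (Spec_replace_space_alternatives name out) := by unfold Spec_replace_space_alternatives; infer_instance

-- ===== CLAIM (what is proved, stated in full; the proofs are below) =====
def Claim_equal_replace_space_alternatives : Prop := ∀ (name : String), Dom_replace_space_alternatives name → Spec_replace_space_alternatives name (replace_space_alternatives name)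

-- ===== LEMMAS AND PROOFS =====

-- Common middle ground: a one-pass scan carrying "previous char is a digit".
def raScan : Bool → List Char → List Char
  | _, [] => []
  | pd, c :: rest =>
      if c = '.' then
        (if pd && raHeadDigit rest then '.' else ' ') :: raScan false rest
      else c :: raScan (PySem.Chars.isdigit c) rest

-- ---- A-side: A's enumerate-map equals a 3-char sliding window, which equals raScan ----

def raWindow (pc : Char) (s : List Char) : List Char :=
  let padded := pc :: s ++ [' ']
  (padded.zip ((padded.drop 1).zip (padded.drop 2))).map
    (fun t =>
      if t.2.1 ≠ '.' || (PySem.Chars.isdigit t.1 && PySem.Chars.isdigit t.2.2) then t.2.1 else ' ')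

-- Elementwise equality of A's enumerate-map and the window-zip map over any char list.
theorem pv_core (s : List Char) :
    (PySem.List.enumerate s).map (fun (ic : Int × Char) =>
      let i := ic.1
      let char := ic.2
      if char = '.' then
        let prev_char_is_digit := decide (i > 0) && PySem.Chars.isdigit (PySem.List.pyGetD s (i - 1) ' ')
        let next_char_is_digit := decide (i < (s.length : Int) - 1) && PySem.Chars.isdigit (PySem.List.pyGetD s (i + 1) ' ')
        if !(prev_char_is_digit && next_char_is_digit) then ' ' else char
      else char)
    = raWindow ' ' s := by
  unfold raWindow
  apply List.ext_getElem
  · simp [PySem.List.length_enumerate]; omega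
  · intro i h1 h2
    have hi : i < s.length := by simpa [PySem.List.length_enumerate] using h1
    simp only [List.getElem_map, List.getElem_zip, List.getElem_drop, PySem.List.getElem_enumerate]
    have hlen : (' ' :: s ++ [' ']).length = s.length + 2 := by simp
    have hmid : ∀ (h : 1 + i < (' ' :: s ++ [' ']).length), (' ' :: s ++ [' '])[1 + i]'h = s[i] := by
      intro h
      simp only [show 1 + i = i + 1 from by omega]
      rw [List.getElem_append_left (by simp; omega), List.getElem_cons_succ]
    have hb1 : (decide (0 + (i:Int) > 0) && PySem.Chars.isdigit (PySem.List.pyGetD s (0 + (i:Int) - 1) ' '))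
        = PySem.Chars.isdigit ((' ' :: s ++ [' '])[i]'(by omega)) := by
      rcases i with _ | j
      · simp
        decide
      · have h0 : (0 + ((j+1 : Nat):Int) > 0) := by push_cast; omega
        have hidx : 0 + ((j+1 : Nat):Int) - 1 = ((j:Nat):Int) := by push_cast; omega
        simp only [hidx, PySem.List.pyGetD_natCast, h0, decide_true, Bool.true_and]
        rw [List.getD_eq_getElem s ' ' (by omega),
          List.getElem_append_left (by simp; omega), List.getElem_cons_succ]
    have hb2 : (decide ((i:Int) < (s.length : Int) - 1) && PySem.Chars.isdigit (PySem.List.pyGetD s ((i:Int) + 1) ' '))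
        = PySem.Chars.isdigit ((' ' :: s ++ [' '])[2 + i]'(by omega)) := by
      have hidx : ((i:Int)) + 1 = ((i+1 : Nat):Int) := by push_cast; ring
      have h2i : 2 + i = (i + 1) + 1 := by omega
      by_cases hn : i + 1 < s.length
      · have hc : ((i:Int) < (s.length : Int) - 1) := by omega
        simp only [hidx, PySem.List.pyGetD_natCast, hc, decide_true, Bool.true_and, h2i]
        rw [List.getD_eq_getElem s ' ' hn,
          List.getElem_append_left (by simp; omega), List.getElem_cons_succ]
      · have hc : ¬ ((i:Int) < (s.length : Int) - 1) := by omega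
        have heq : i + 1 = s.length := by omega
        simp only [hc, decide_false, Bool.false_and, h2i]
        rw [List.getElem_append_right (by simp; omega)]
        have : i + 1 + 1 - (' ' :: s).length = 0 := by simp; omega
        simp only [this]
        rfl
    rw [hmid, ← hb1, ← hb2]
    have hz : (0 : Int) + (i:Int) = (i:Int) := by ring
    rw [hz] at *
    by_cases hc : s[i] = '.'
    · simp only [hc, ne_eq, not_true_eq_false, decide_false, Bool.false_or]
      cases hb : (decide ((i:Int) > 0) && PySem.Chars.isdigit (PySem.List.pyGetD s ((i:Int) - 1) ' ')) &&
          (decide ((i:Int) < (s.length : Int) - 1) && PySem.Chars.isdigit (PySem.List.pyGetD s ((i:Int) + 1) ' ')) <;> simp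
    · simp [hc]

theorem raWindow_cons (pc c : Char) (t : List Char) :
    raWindow pc (c :: t)
      = (if c ≠ '.' || (PySem.Chars.isdigit pc && raHeadDigit t) then c else ' ') :: raWindow c t := by
  have hsp : PySem.Chars.isdigit ' ' = false := rfl
  cases t <;> simp [raWindow, raHeadDigit, hsp]

theorem raScan_eq_window (s : List Char) (pc : Char) :
    raScan (PySem.Chars.isdigit pc) s = raWindow pc s := by
  induction s generalizing pc with
  | nil => simp [raScan, raWindow]
  | cons c t ih =>
    rw [raWindow_cons, ← ih c]
    by_cases hc : c = '.'
    · subst hc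
      have hdd : PySem.Chars.isdigit '.' = false := rfl
      simp [raScan, hdd]
    · simp [raScan, hc]

-- ---- B-side: the split/join fold equals raScan ----

theorem raLastDigit_append_singleton (out : List Char) (c : Char) :
    raLastDigit (out ++ [c]) = PySem.Chars.isdigit c := by
  simp [raLastDigit]

theorem raHeadDigit_splitOnP_headI (t : List Char) :
    raHeadDigit (List.splitOnP (· == '.') t).headI = raHeadDigit t := by
  cases t with
  | nil => simp [List.splitOnP_nil, raHeadDigit]
  | cons c t' =>
    rw [List.splitOnP_cons]
    by_cases hc : c = '.'
    · subst hc; simp [raHeadDigit]; decide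
    · have hne := List.splitOnP_ne_nil (· == '.') t'
      rcases hl : List.splitOnP (· == '.') t' with _ | ⟨p0, rest⟩
      · exact absurd hl hne
      · simp [hc, raHeadDigit]

theorem raSepDigitFalse (b : Bool) : PySem.Chars.isdigit (if b then '.' else ' ') = false := by
  cases b <;> decide

theorem raFold_splitOnP (s : List Char) :
    ∀ out : List Char,
      raFold (out ++ (List.splitOnP (· == '.') s).headI) (List.splitOnP (· == '.') s).tail
        = out ++ raScan (raLastDigit out) s := by
  induction s with
  | nil => intro out; simp [List.splitOnP_nil, raFold, raScan]
  | cons c t ih =>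
    intro out
    rw [List.splitOnP_cons]
    have hne := List.splitOnP_ne_nil (· == '.') t
    by_cases hc : c = '.'
    · subst hc
      simp only [BEq.rfl, if_true, List.headI_cons, List.tail_cons, List.append_nil]
      rcases hl : List.splitOnP (· == '.') t with _ | ⟨p0, rest⟩
      · exact absurd hl hne
      · have hhead : raHeadDigit p0 = raHeadDigit t := by
          have := raHeadDigit_splitOnP_headI t
          rw [hl] at this; simpa using this
        show raFold (out ++ (if raLastDigit out && raHeadDigit p0 then '.' else ' ') :: p0) rest
            = out ++ raScan (raLastDigit out) ('.' :: t)
        set sep := if raLastDigit out && raHeadDigit p0 then '.' else ' ' with hsep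
        have hre : out ++ sep :: p0 = (out ++ [sep]) ++ p0 := by simp
        have hih := ih (out ++ [sep])
        rw [hl] at hih
        simp only [List.headI_cons, List.tail_cons] at hih
        rw [hre, hih, raLastDigit_append_singleton, hsep, raSepDigitFalse]
        simp [raScan, hhead]
    · have hbeq : (c == '.') = false := by simp [hc]
      simp only [hbeq, Bool.false_eq_true, if_false]
      rcases hl : List.splitOnP (· == '.') t with _ | ⟨p0, rest⟩
      · exact absurd hl hne
      · simp only [List.modifyHead_cons, List.headI_cons, List.tail_cons]
        have hre : out ++ c :: p0 = (out ++ [c]) ++ p0 := by simp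
        have hih := ih (out ++ [c])
        rw [hl] at hih
        simp only [List.headI_cons, List.tail_cons] at hih
        rw [hre, hih, raLastDigit_append_singleton]
        simp [raScan, hc]

-- ===== VERDICT (by name: the statement is the Claim_ definition above) =====
theorem replace_space_alternatives_spec : Claim_equal_replace_space_alternatives := by
  intro name _
  show replace_space_alternatives name = replace_space_alternatives_alt name
  unfold replace_space_alternatives replace_space_alternatives_alt
  rcases hl : List.splitOn '.' (PySem.Str.replace name "_" " ").toList with _ | ⟨p0, rest⟩
  · exact absurd hl (List.splitOnP_ne_nil _ _)
  · simp only [hl]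
    have hl' : List.splitOnP (· == '.') (PySem.Str.replace name "_" " ").toList = p0 :: rest := hl
    have hfold := raFold_splitOnP (PySem.Str.replace name "_" " ").toList []
    rw [hl'] at hfold
    simp only [List.headI_cons, List.tail_cons, List.nil_append] at hfold
    rw [pv_core, hfold]
    have hw := raScan_eq_window (PySem.Str.replace name "_" " ").toList ' '
    simp only [show PySem.Chars.isdigit ' ' = false from rfl] at hw
    rw [show raLastDigit ([] : List Char) = false from rfl, hw]
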